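-- pv_equiv track=rewrite | github.com/syne-tune/syne-tune | tst/schedulers/bayesopt/test_subsample_state.py | _sparsify_data
-- ===== SOURCE A (Python) =====
-- from typing import Tuple, List, Optional, Dict, Any
-- from operator import itemgetter
--
-- def _partition_wrt_rung_levels(
--     data: List[Tuple[int, int]], rung_levels: List[int]
-- ) -> List[List[Tuple[int, int]]]:
--     r"""
--     Partitions ``data`` into parts according to :math:`r_j < r \le r_{j+1}`,
--     where :math:`[r_j]` is ``rung_levels``.
--     """
--     partition = []
--     padded_rung_levels = [-1] + rung_levels
--     sum_sizes = 0
--     for r_low, r_high in zip(padded_rung_levels[:-1], padded_rung_levels[1:]):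
--         sub_data = [x for x in data if r_low < x[1] <= r_high]
--         partition.append(sub_data)
--         sum_sizes += len(sub_data)
--     assert sum_sizes == len(data)  # Sanity check
--     return partition
--
-- def _sparsify_at_most_one_per_trial(
--     data: List[Tuple[int, int]], target_size: Optional[int]
-- ) -> List[Tuple[int, int]]:
--     """
--     Filters ``data`` so that for every trial ID :math:`i` in ``data``, only
--     the entry with the largest resource :math:`r` is retained. If ``target_size``
--     is not ``None``, filtering is done in descending :math:`r` order, and is
--     stopped once the remaining data has size ``target_size``.
--     """
--     return_size = len(data)
--     assert target_size is None or return_size > target_size, (return_size, target_size)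
--     trials_covered = set()
--     new_data = []
--     sorted_data = sorted(data, key=itemgetter(1, 0), reverse=True)
--     for pos, elem in enumerate(sorted_data):
--         trial_id = elem[0]
--         if trial_id not in trials_covered:
--             new_data.append(elem)
--             trials_covered.add(trial_id)
--         else:
--             return_size -= 1
--             if return_size == target_size:
--                 break
--     new_data.extend(sorted_data[(pos + 1) :])
--     len_new_data = len(new_data)
--     assert return_size == len_new_data, (return_size, len_new_data)
--     return new_data
--
-- def _sparsify_data(
--     data: List[Tuple[int, int]], max_size: int, rung_levels: List[int]
-- ) -> List[Tuple[int, int]]: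
--     """
--     Does the same as
--     :func:`~syne_tune.optimizer.schedulers.searchers.bayesopt.models.subsample_state.sparsify_tuning_job_state`,
--     but using different code.
--     """
--     total_size = len(data)
--     if total_size <= max_size:
--         return data
--     partition = _partition_wrt_rung_levels(data, rung_levels)
--     new_partition = partition.copy()  # Replaces ``partition``
--     for pos, sub_data in reversed(list(enumerate(partition))):
--         if sub_data:
--             subdata_size = len(sub_data)
--             remaining_size = total_size - subdata_size
--             if remaining_size <= max_size:
--                 target_size = max_size - remaining_size
--             else:
--                 target_size = None
--             new_sub_data = _sparsify_at_most_one_per_trial(sub_data, target_size)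
--             new_partition[pos] = new_sub_data
--             new_subdata_size = len(new_sub_data)
--             total_size -= subdata_size - new_subdata_size
--             if target_size is not None and new_subdata_size == target_size:
--                 break  # Reached ``max_size``, so we are done
--     return [elem for sub_data in new_partition for elem in sub_data]
-- ===== SOURCE B (Python) =====
-- from operator import itemgetter
--
--
-- def _shrink_bucket(sub, total_size, max_size):
--     """Drop duplicate-trial entries (keeping the largest resource per trial) from
--     ``sub``, scanning in descending (resource, trial_id) order, stopping as soon
--     as the overall data size would reach ``max_size``."""
--     remaining = total_size - len(sub)
--     target = max_size - remaining if remaining <= max_size else None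
--     s = sorted(sub, key=itemgetter(1, 0), reverse=True)
--     kept = []
--     seen = set()
--     n = len(s)
--     for i, e in enumerate(s):
--         if n == target:
--             kept.extend(s[i:])
--             break
--         if e[0] in seen:
--             n -= 1
--         else:
--             seen.add(e[0])
--             kept.append(e)
--     return kept
--
--
-- def _sparsify_data(data, max_size, rung_levels):
--     total_size = len(data)
--     if total_size <= max_size:
--         return data
--     # One pass: drop each entry into its rung bucket via binary search
--     # (rung_levels ascending), instead of filtering data once per rung level.
--     buckets = [[] for _ in rung_levels]
--     for x in data:
--         lo, hi = 0, len(rung_levels)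
--         while lo < hi:
--             mid = (lo + hi) // 2
--             if rung_levels[mid] < x[1]:
--                 lo = mid + 1
--             else:
--                 hi = mid
--         buckets[lo].append(x)
--     # Shrink buckets from the highest rung down until the size fits
--     i = len(buckets) - 1
--     while i >= 0 and total_size > max_size:
--         sub = buckets[i]
--         if sub:
--             new_sub = _shrink_bucket(sub, total_size, max_size)
--             total_size -= len(sub) - len(new_sub)
--             buckets[i] = new_sub
--         i -= 1
--     return [e for sub in buckets for e in sub]
-- ===== Notes on version B (the rewrite author's own statement) =====
-- stated objective: alternative
-- what changed: B buckets the data in one pass via binary search over the ascending rung levels instead of filtering the whole data list once per rung level, and replaces the reversed-enumerate loop with break by an index count-down guarded by the size test; the duplicate-dropping scan checks the target before each element instead of after each removal.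
-- outside the precondition, e.g. on _sparsify_data([(1, 2), (2, 4), (3, 1)], 2, [5, 3]): A returns [(2, 4), (1, 2), (3, 1)], B raises IndexError
import Mathlib
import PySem

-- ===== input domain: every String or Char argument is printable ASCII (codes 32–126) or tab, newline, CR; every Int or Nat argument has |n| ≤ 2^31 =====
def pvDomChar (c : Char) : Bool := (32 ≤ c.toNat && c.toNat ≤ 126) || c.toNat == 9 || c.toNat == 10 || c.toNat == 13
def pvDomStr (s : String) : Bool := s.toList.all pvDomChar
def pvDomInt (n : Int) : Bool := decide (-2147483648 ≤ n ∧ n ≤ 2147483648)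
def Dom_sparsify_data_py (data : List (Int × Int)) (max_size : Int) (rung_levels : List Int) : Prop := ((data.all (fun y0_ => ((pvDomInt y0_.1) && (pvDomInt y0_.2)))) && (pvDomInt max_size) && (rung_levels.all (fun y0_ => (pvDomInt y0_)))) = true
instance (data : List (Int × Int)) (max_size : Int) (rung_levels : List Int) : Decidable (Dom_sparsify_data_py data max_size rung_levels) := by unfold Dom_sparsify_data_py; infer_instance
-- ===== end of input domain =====

-- Alternative structure: B replaces A's per-rung-level filtering passes (one scan of data per
-- rung level) by a single pass dropping each entry into its bucket via hand-written binary
-- search, and replaces the reversed-enumerate loop with break by a plain index count-down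
-- guarded by the size test.

-- ===== PORT A =====

-- Python tuple key (x[1], x[0]) compared lexicographically (itemgetter(1, 0)); both Pythons
-- make the identical sorted(…, key=itemgetter(1, 0), reverse=True) call.
def pvLexLT (a b : Int × Int) : Prop := a.1 < b.1 ∨ (a.1 = b.1 ∧ a.2 < b.2)
def pvLexDec (a b : Int × Int) : Decidable (pvLexLT a b) := by unfold pvLexLT; infer_instance
def pvSortDesc (xs : List (Int × Int)) : List (Int × Int) :=
  @PySem.List.sorted (Int × Int) (Int × Int) ⟨pvLexLT⟩ pvLexDec xs (fun e => (e.2, e.1)) true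

-- the for-loop of _sparsify_at_most_one_per_trial (with the break and the tail extend)
def pvALoop (target : Option Int) : List (Int × Int) → PySem.Set Int → List (Int × Int) → Int → List (Int × Int)
  | [], _, new_data, _ => new_data
  | e :: rest, covered, new_data, ret =>
    if PySem.Set.contains covered e.1 = false then
      pvALoop target rest (PySem.Set.add covered e.1) (new_data ++ [e]) ret
    else if target = some (ret - 1) then new_data ++ rest
    else pvALoop target rest covered new_data (ret - 1)

def pvSparsifyA (sub : List (Int × Int)) (target : Option Int) : List (Int × Int) :=
  pvALoop target (pvSortDesc sub) PySem.Set.empty [] (sub.length : Int)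

-- the body of A's outer loop for one `pos, sub_data` (new bucket, new total_size, break flag)
def pvStepA (max_size : Int) (p : List (Int × Int)) (total : Int) : List (Int × Int) × Int × Bool :=
  if p = [] then (p, total, false)
  else
    let remaining := total - (p.length : Int)
    let target : Option Int := if remaining ≤ max_size then some (max_size - remaining) else none
    let p' := pvSparsifyA p target
    (p', total - ((p.length : Int) - (p'.length : Int)), decide (target = some (p'.length : Int)))

-- the `for pos, sub_data in reversed(list(enumerate(partition)))` loop: the tail of the list
-- is processed first, the Bool component is the break flag
def pvOuterA (max_size : Int) : List (List (Int × Int)) → Int → List (List (Int × Int)) × Int × Bool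
  | [], total => ([], total, false)
  | p :: ps, total =>
    let r := pvOuterA max_size ps total
    if r.2.2 then (p :: r.1, r.2.1, true)
    else
      let s := pvStepA max_size p r.2.1
      (s.1 :: r.1, s.2.1, s.2.2)

def sparsify_data_py (data : List (Int × Int)) (max_size : Int) (rung_levels : List Int) : List (Int × Int) :=
  if (data.length : Int) ≤ max_size then data
  else
    let padded := (-1 : Int) :: rung_levels
    let partition := (padded.zip padded.tail).map
      (fun pr => data.filter (fun x => decide (pr.1 < x.2 ∧ x.2 ≤ pr.2)))
    (pvOuterA max_size partition (data.length : Int)).1.flatten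

-- ===== PORT B =====

-- hand-written binary search of Source B (`while lo < hi: …`); rung_levels[mid] is always in
-- range in Source B, so getD is exact here
def pvBisect (rung : List Int) (r : Int) (lo hi : Nat) : Nat :=
  if _h : lo < hi then
    let mid := (lo + hi) / 2
    if rung.getD mid 0 < r then pvBisect rung r (mid + 1) hi else pvBisect rung r lo mid
  else lo
termination_by hi - lo
decreasing_by all_goals omega

-- buckets[i].append(x); under Pre_ the index is always < bs.length, so List.set is exact
def pvAppendAt (bs : List (List (Int × Int))) (i : Nat) (x : Int × Int) : List (List (Int × Int)) :=
  bs.set i (bs.getD i [] ++ [x])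

def pvBuckets (data : List (Int × Int)) (rung : List Int) : List (List (Int × Int)) :=
  data.foldl (fun bs x => pvAppendAt bs (pvBisect rung x.2 0 rung.length) x)
    (List.replicate rung.length [])

-- the for-loop of _shrink_bucket (size test before each element, extend on hit)
def pvBLoop (target : Option Int) : List (Int × Int) → PySem.Set Int → List (Int × Int) → Int → List (Int × Int)
  | [], _, kept, _ => kept
  | e :: rest, seen, kept, n =>
    if target = some n then kept ++ (e :: rest)
    else if PySem.Set.contains seen e.1 then pvBLoop target rest seen kept (n - 1)
    else pvBLoop target rest (PySem.Set.add seen e.1) (kept ++ [e]) n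

def pvShrink (sub : List (Int × Int)) (total max_size : Int) : List (Int × Int) :=
  let remaining := total - (sub.length : Int)
  let target : Option Int := if remaining ≤ max_size then some (max_size - remaining) else none
  pvBLoop target (pvSortDesc sub) PySem.Set.empty [] (sub.length : Int)

-- `while i >= 0 and total_size > max_size:`; the Nat argument is i + 1
def pvBOuter (max_size : Int) : Nat → List (List (Int × Int)) → Int → List (List (Int × Int)) × Int
  | 0, bs, total => (bs, total)
  | n + 1, bs, total =>
    if total ≤ max_size then (bs, total)
    else
      let sub := bs.getD n []
      if sub = [] then pvBOuter max_size n bs total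
      else
        let sub' := pvShrink sub total max_size
        pvBOuter max_size n (bs.set n sub') (total - ((sub.length : Int) - (sub'.length : Int)))

def sparsify_data_py_alt (data : List (Int × Int)) (max_size : Int) (rung_levels : List Int) : List (Int × Int) :=
  if (data.length : Int) ≤ max_size then data
  else
    let bs := pvBuckets data rung_levels
    (pvBOuter max_size bs.length bs (data.length : Int)).1.flatten

-- ===== PRECONDITION & SPEC =====
-- Pre_ excludes the inputs on which A's partition sanity assert fails (an AssertionError:
-- some resource value outside (-1, max rung level]) and the corner where rung_levels is not
-- ascending yet happens to cover the data, on which A's per-interval filter order is an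
-- accident of the unsorted levels and B's binary search has no meaning.
def Pre_sparsify_data_py (data : List (Int × Int)) (max_size : Int) (rung_levels : List Int) : Prop :=
  (data.length : Int) ≤ max_size ∨
    (List.IsChain (· ≤ ·) rung_levels ∧
      ∀ x ∈ data, -1 < x.2 ∧ x.2 ≤ rung_levels.getLastD (-1))
instance (data : List (Int × Int)) (max_size : Int) (rung_levels : List Int) : Decidable (Pre_sparsify_data_py data max_size rung_levels) := by unfold Pre_sparsify_data_py; infer_instance

def pvWitness_sparsify_data_py : (List (Int × Int)) × Int × List Int :=
  ([(1, 3), (1, 5), (2, 3)], 2, [3, 5])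

def Spec_sparsify_data_py (data : List (Int × Int)) (max_size : Int) (rung_levels : List Int) (out : List (Int × Int)) : Prop := out = sparsify_data_py_alt data max_size rung_levels
instance (data : List (Int × Int)) (max_size : Int) (rung_levels : List Int) (out : List (Int × Int)) : Decidable (Spec_sparsify_data_py data max_size rung_levels out) := by unfold Spec_sparsify_data_py; infer_instance

-- ===== CLAIM (what is proved, stated in full; the proofs are below) =====
def Claim_equal_sparsify_data_py : Prop := ∀ (data : List (Int × Int)) (max_size : Int) (rung_levels : List Int), Dom_sparsify_data_py data max_size rung_levels → Pre_sparsify_data_py data max_size rung_levels → Spec_sparsify_data_py data max_size rung_levels (sparsify_data_py data max_size rung_levels)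


-- ===== LEMMAS AND PROOFS =====

theorem pv_witness_ok :
    Dom_sparsify_data_py pvWitness_sparsify_data_py.1 pvWitness_sparsify_data_py.2.1 pvWitness_sparsify_data_py.2.2 ∧
    Pre_sparsify_data_py pvWitness_sparsify_data_py.1 pvWitness_sparsify_data_py.2.1 pvWitness_sparsify_data_py.2.2 := by
  constructor <;> decide

-- ---- the two duplicate-dropping loops agree while the running size has not reached the target ----

theorem pvLoop_eq (target : Option Int) (l : List (Int × Int)) :
    ∀ (seen : PySem.Set Int) (kept : List (Int × Int)) (n : Int),
      target ≠ some n → pvALoop target l seen kept n = pvBLoop target l seen kept n := by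
  induction l with
  | nil => intro seen kept n h; rfl
  | cons e rest ih =>
    intro seen kept n h
    simp only [pvALoop, pvBLoop, if_neg h]
    by_cases hc : PySem.Set.contains seen e.1
    · simp only [hc, Bool.true_eq_false, if_false, if_true]
      by_cases hb : target = some (n - 1)
      · rw [if_pos hb]
        cases rest with
        | nil => simp [pvBLoop]
        | cons f rs => simp [pvBLoop, hb]
      · rw [if_neg hb, ih _ _ _ hb]
    · simp only [hc, if_true]
      exact ih _ _ _ h

-- ---- length facts about A's inner loop ----

theorem pvALoop_prefix (target : Option Int) (l : List (Int × Int)) :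
    ∀ (seen : PySem.Set Int) (kept : List (Int × Int)) (n : Int),
      ∃ s, pvALoop target l seen kept n = kept ++ s := by
  induction l with
  | nil => intro seen kept n; exact ⟨[], by simp [pvALoop]⟩
  | cons e rest ih =>
    intro seen kept n
    simp only [pvALoop]
    split
    · obtain ⟨s, hs⟩ := ih (PySem.Set.add seen e.1) (kept ++ [e]) n
      exact ⟨[e] ++ s, by simp [hs]⟩
    · split
      · exact ⟨rest, rfl⟩
      · exact ih _ _ _

theorem pvALoop_len_ge (t : Int) (l : List (Int × Int)) :
    ∀ (seen : PySem.Set Int) (kept : List (Int × Int)) (n : Int),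
      t < n → n ≤ (kept.length : Int) + (l.length : Int) →
      t ≤ ((pvALoop (some t) l seen kept n).length : Int) := by
  induction l with
  | nil =>
    intro seen kept n h1 h2
    simp only [pvALoop]
    simp at h2; omega
  | cons e rest ih =>
    intro seen kept n h1 h2
    simp only [pvALoop]
    split
    · apply ih
      · exact h1
      · simp at h2 ⊢; omega
    · split
      · next hb =>
        have ht : t = n - 1 := Option.some.inj hb
        simp at h2 ⊢; omega
      · next hb =>
        apply ih
        · have : t ≠ n - 1 := fun hh => hb (by rw [hh])
          omega
        · simp at h2 ⊢; omega

theorem pvSortDesc_length (xs : List (Int × Int)) : (pvSortDesc xs).length = xs.length :=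
  @PySem.List.length_sorted _ _ ⟨pvLexLT⟩ pvLexDec xs _ true

theorem pvSparsifyA_len_pos (sub : List (Int × Int)) (target : Option Int) (h : sub ≠ []) :
    1 ≤ ((pvSparsifyA sub target).length : Int) := by
  unfold pvSparsifyA
  have hlen : (pvSortDesc sub).length = sub.length := pvSortDesc_length sub
  cases hs : pvSortDesc sub with
  | nil =>
    exfalso; apply h
    rw [hs] at hlen
    exact List.length_eq_zero_iff.mp hlen.symm
  | cons f rs =>
    simp only [pvALoop]
    have hc : PySem.Set.contains PySem.Set.empty f.1 = false := rfl
    rw [if_pos hc]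
    obtain ⟨s, hsuf⟩ := pvALoop_prefix target rs (PySem.Set.add PySem.Set.empty f.1) ([] ++ [f]) (sub.length : Int)
    rw [hsuf]; simp

theorem pvSparsifyA_len_ge (sub : List (Int × Int)) (t : Int) (h : t < (sub.length : Int)) :
    t ≤ ((pvSparsifyA sub (some t)).length : Int) := by
  unfold pvSparsifyA
  apply pvALoop_len_ge
  · exact h
  · rw [pvSortDesc_length]; simp

theorem pvShrink_eq (sub : List (Int × Int)) (total max_size : Int) (hlt : max_size < total) :
    pvSparsifyA sub (if total - (sub.length : Int) ≤ max_size
        then some (max_size - (total - (sub.length : Int))) else none)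
      = pvShrink sub total max_size := by
  unfold pvSparsifyA pvShrink
  apply pvLoop_eq
  split
  · next hc =>
    intro h
    have := Option.some.inj h
    omega
  · intro h; simp at h

-- ---- the two outer loops agree ----

theorem pvOuterA_append (max_size : Int) (xs : List (List (Int × Int))) (q : List (Int × Int)) :
    ∀ total : Int,
      pvOuterA max_size (xs ++ [q]) total =
        (let s := pvStepA max_size q total
         if s.2.2 then (xs ++ [s.1], s.2.1, true)
         else
           let r := pvOuterA max_size xs s.2.1
           (r.1 ++ [s.1], r.2.1, r.2.2)) := by
  induction xs with
  | nil =>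
    intro total
    show (let r := pvOuterA max_size [] total
          if r.2.2 then (q :: r.1, r.2.1, true)
          else
            let s := pvStepA max_size q r.2.1
            (s.1 :: r.1, s.2.1, s.2.2)) = _
    by_cases hs : (pvStepA max_size q total).2.2 <;>
      simp [pvOuterA, hs]
  | cons x xs ih =>
    intro total
    show (let r := pvOuterA max_size (xs ++ [q]) total
          if r.2.2 then (x :: r.1, r.2.1, true)
          else
            let s := pvStepA max_size x r.2.1
            (s.1 :: r.1, s.2.1, s.2.2)) = _
    rw [ih total]
    by_cases hs : (pvStepA max_size q total).2.2
    · simp only [hs, if_true]; simp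
    · simp only [hs, if_false, Bool.false_eq_true]
      by_cases hr : (pvOuterA max_size xs (pvStepA max_size q total).2.1).2.2 <;>
        simp [pvOuterA, hr]


theorem pvBOuter_stop (max_size : Int) (n : Nat) (bs : List (List (Int × Int))) (total : Int)
    (h : total ≤ max_size) : pvBOuter max_size n bs total = (bs, total) := by
  cases n with
  | zero => rfl
  | succ m => simp [pvBOuter, h]

theorem pvBOuter_append (max_size : Int) :
    ∀ (n : Nat) (xs ys : List (List (Int × Int))) (total : Int), n ≤ xs.length →
      pvBOuter max_size n (xs ++ ys) total =
        ((pvBOuter max_size n xs total).1 ++ ys, (pvBOuter max_size n xs total).2) := by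
  intro n
  induction n with
  | zero => intro xs ys total _; rfl
  | succ m ih =>
    intro xs ys total h
    have hm : m < xs.length := h
    simp only [pvBOuter]
    by_cases ht : total ≤ max_size
    · simp [ht]
    · rw [if_neg ht, if_neg ht]
      rw [List.getD_append _ _ _ m hm]
      by_cases hs : xs.getD m [] = []
      · rw [if_pos hs, if_pos hs]
        exact ih xs ys total (le_of_lt hm)
      · rw [if_neg hs, if_neg hs]
        rw [List.set_append, if_pos hm]
        exact ih _ ys _ (by simpa using le_of_lt hm)

theorem pvStepA_props (max_size : Int) (p : List (Int × Int)) (total : Int)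
    (hp : p ≠ []) (hlt : max_size < total) :
    (pvStepA max_size p total).1 = pvShrink p total max_size ∧
    (pvStepA max_size p total).2.1
      = total - ((p.length : Int) - ((pvShrink p total max_size).length : Int)) ∧
    ((pvStepA max_size p total).2.2 = true → (pvStepA max_size p total).2.1 = max_size) ∧
    ((pvStepA max_size p total).2.2 = false → max_size < (pvStepA max_size p total).2.1) := by
  have hshr := pvShrink_eq p total max_size hlt
  by_cases hc : total - (p.length : Int) ≤ max_size
  · rw [if_pos hc] at hshr
    simp only [pvStepA, if_neg hp, if_pos hc]
    refine ⟨hshr, by rw [hshr], ?_, ?_⟩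
    · intro hflag
      simp only [decide_eq_true_eq] at hflag
      have := Option.some.inj hflag
      omega
    · intro hflag
      simp only [decide_eq_false_iff_not] at hflag
      have hge := pvSparsifyA_len_ge p (max_size - (total - (p.length : Int))) (by omega)
      have hne : max_size - (total - (p.length : Int))
          ≠ ((pvSparsifyA p (some (max_size - (total - (p.length : Int))))).length : Int) :=
        fun h => hflag (congrArg some h)
      omega
  · rw [if_neg hc] at hshr
    simp only [pvStepA, if_neg hp, if_neg hc]
    refine ⟨hshr, by rw [hshr], by simp, ?_⟩
    intro _
    have hpos := pvSparsifyA_len_pos p none hp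
    omega

theorem pvOuter_eq (max_size : Int) (bs : List (List (Int × Int))) :
    ∀ total : Int, max_size < total →
      pvBOuter max_size bs.length bs total =
        ((pvOuterA max_size bs total).1, (pvOuterA max_size bs total).2.1) := by
  induction bs using List.reverseRecOn with
  | nil => intro total h; rfl
  | append_singleton xs q ih =>
    intro total h
    have hlen : (xs ++ [q]).length = xs.length + 1 := by simp
    rw [pvOuterA_append, hlen]
    have hget : (xs ++ [q]).getD xs.length [] = q := by
      simp [List.getD_eq_getElem?_getD]
    by_cases hq : q = []
    · have hstep : pvStepA max_size q total = (q, total, false) := by rw [hq]; rfl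
      simp only [pvBOuter, if_neg (not_le.mpr h), hget, if_pos hq, hstep, Bool.false_eq_true,
        if_false]
      rw [pvBOuter_append max_size xs.length xs [q] total (le_refl _), ih total h]
    · obtain ⟨h1, h2, h3, h4⟩ := pvStepA_props max_size q total hq h
      have hset : (xs ++ [q]).set xs.length (pvShrink q total max_size)
          = xs ++ [pvShrink q total max_size] := by
        rw [List.set_append]; simp
      by_cases hflag : (pvStepA max_size q total).2.2
      · have hmax := h3 hflag
        simp only [pvBOuter, if_neg (not_le.mpr h), hget, if_neg hq, hflag, if_true, hset]
        rw [pvBOuter_append max_size xs.length xs [pvShrink q total max_size] _ (le_refl _)]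
        rw [pvBOuter_stop max_size xs.length xs _ (by omega)]
        rw [show total - ((q.length : Int) - ((pvShrink q total max_size).length : Int))
              = (pvStepA max_size q total).2.1 from h2.symm, ← h1, hmax, ← hmax]
      · have hlt2 := h4 (by simpa using hflag)
        simp only [pvBOuter, if_neg (not_le.mpr h), hget, if_neg hq, hflag, Bool.false_eq_true,
          if_false, hset]
        rw [pvBOuter_append max_size xs.length xs [pvShrink q total max_size] _ (le_refl _)]
        rw [show total - ((q.length : Int) - ((pvShrink q total max_size).length : Int))
              = (pvStepA max_size q total).2.1 from h2.symm]
        rw [ih _ hlt2]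
        simp [← h1]


-- ---- binary-search bucketing equals interval filtering ----

theorem pvChain_mono (rung : List Int) (h : List.IsChain (· ≤ ·) rung) :
    ∀ i j : Nat, i ≤ j → j < rung.length → rung.getD i 0 ≤ rung.getD j 0 := by
  have hp : List.Pairwise (· ≤ ·) rung := h.pairwise
  rw [List.pairwise_iff_getElem] at hp
  intro i j hij hj
  rcases Nat.eq_or_lt_of_le hij with he | hlt
  · rw [he]
  · rw [List.getD_eq_getElem _ _ (by omega), List.getD_eq_getElem _ _ hj]
    exact hp i j (by omega) hj hlt

theorem pvBisect_spec (rung : List Int) (r : Int)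
    (hmono : ∀ i j : Nat, i ≤ j → j < rung.length → rung.getD i 0 ≤ rung.getD j 0) :
    ∀ (lo hi : Nat), lo ≤ hi → hi ≤ rung.length →
      (∀ k, k < lo → rung.getD k 0 < r) →
      (∀ k, hi ≤ k → k < rung.length → r ≤ rung.getD k 0) →
      (lo ≤ pvBisect rung r lo hi ∧ pvBisect rung r lo hi ≤ hi) ∧
      (∀ k, k < pvBisect rung r lo hi → rung.getD k 0 < r) ∧
      (∀ k, pvBisect rung r lo hi ≤ k → k < rung.length → r ≤ rung.getD k 0) := by
  intro lo hi
  generalize hd : hi - lo = d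
  induction d using Nat.strongRecOn generalizing lo hi with
  | _ d ihd =>
  intro h1 h2 h3 h4
  rw [pvBisect]
  by_cases hlt : lo < hi
  · rw [dif_pos hlt]
    simp only []
    by_cases hm : rung.getD ((lo + hi) / 2) 0 < r
    · rw [if_pos hm]
      have hrec := ihd (hi - ((lo + hi) / 2 + 1)) (by omega) ((lo + hi) / 2 + 1) hi rfl
        (by omega) h2
        (by
          intro k hk
          rcases Nat.lt_or_ge k ((lo + hi) / 2) with hk2 | hk2
          · exact lt_of_le_of_lt (hmono k ((lo + hi) / 2) (by omega) (by omega)) hm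
          · have : k = (lo + hi) / 2 := by omega
            rw [this]; exact hm)
        h4
      refine ⟨⟨by omega, hrec.1.2⟩, hrec.2.1, hrec.2.2⟩
    · rw [if_neg hm]
      rw [not_lt] at hm
      have hrec := ihd ((lo + hi) / 2 - lo) (by omega) lo ((lo + hi) / 2) rfl
        (by omega) (by omega) h3
        (by
          intro k hk1 hk2
          exact le_trans hm (hmono ((lo + hi) / 2) k hk1 hk2))
      refine ⟨⟨hrec.1.1, by omega⟩, hrec.2.1, hrec.2.2⟩
  · rw [dif_neg hlt]
    have he : lo = hi := by omega
    exact ⟨⟨le_refl _, by omega⟩, fun k hk => h3 k hk, fun k hk1 hk2 => h4 k (by omega) hk2⟩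

theorem pvGetLastD_getD (l : List Int) (h : l ≠ []) : l.getLastD (-1) = l.getD (l.length - 1) 0 := by
  induction l using List.reverseRecOn with
  | nil => exact absurd rfl h
  | append_singleton xs a _ =>
    simp [List.getD_eq_getElem?_getD]

theorem pvBisect_char (rung : List Int) (r : Int)
    (hmono : ∀ i j : Nat, i ≤ j → j < rung.length → rung.getD i 0 ≤ rung.getD j 0)
    (hr1 : -1 < r) (hr2 : r ≤ rung.getLastD (-1)) :
    pvBisect rung r 0 rung.length < rung.length ∧
    ∀ j : Nat, j < rung.length →
      (pvBisect rung r 0 rung.length = j ↔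
        ((-1 :: rung).getD j 0 < r ∧ r ≤ rung.getD j 0)) := by
  obtain ⟨⟨hb1, hb2⟩, hP1, hP2⟩ :=
    pvBisect_spec rung r hmono 0 rung.length (Nat.zero_le _) (le_refl _)
      (fun k hk => absurd hk (Nat.not_lt_zero k))
      (fun k hk1 hk2 => absurd (lt_of_le_of_lt hk1 hk2) (lt_irrefl _))
  have hne : rung ≠ [] := by
    intro hnil
    rw [hnil] at hr2
    simp [List.getLastD] at hr2
    omega
  have hpos : 0 < rung.length := List.length_pos_iff.mpr hne
  have hlast : r ≤ rung.getD (rung.length - 1) 0 := by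
    rw [← pvGetLastD_getD rung hne]; exact hr2
  have hlt : pvBisect rung r 0 rung.length < rung.length := by
    by_contra hge
    rw [not_lt] at hge
    have := hP1 (rung.length - 1) (by omega)
    omega
  refine ⟨hlt, ?_⟩
  intro j hj
  constructor
  · intro he
    subst he
    refine ⟨?_, hP2 _ (le_refl _) hlt⟩
    cases hcase : pvBisect rung r 0 rung.length with
    | zero => simpa using hr1
    | succ k =>
      rw [List.getD_cons_succ]
      exact hP1 k (by omega)
  · rintro ⟨hl, hr'⟩
    by_contra hne2
    rcases Nat.lt_or_ge (pvBisect rung r 0 rung.length) j with hlt2 | hge2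
    · have h5 := hP2 (pvBisect rung r 0 rung.length) (le_refl _) hlt
      have h6 : rung.getD (pvBisect rung r 0 rung.length) 0 ≤ rung.getD (j - 1) 0 :=
        hmono _ _ (by omega) (by omega)
      have h7 : (-1 :: rung).getD j 0 = rung.getD (j - 1) 0 := by
        cases j with
        | zero => omega
        | succ k => simp
      omega
    · have h8 := hP1 j (by omega)
      omega

theorem pvAppendAt_length (bs : List (List (Int × Int))) (i : Nat) (x : Int × Int) :
    (pvAppendAt bs i x).length = bs.length := by
  simp [pvAppendAt]

theorem pvAppendAt_getD (bs : List (List (Int × Int))) (i : Nat) (x : Int × Int) (j : Nat)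
    (hi : i < bs.length) :
    (pvAppendAt bs i x).getD j [] = if i = j then bs.getD j [] ++ [x] else bs.getD j [] := by
  unfold pvAppendAt
  by_cases hij : i = j
  · subst hij
    simp [List.getD_eq_getElem?_getD, hi]
  · simp [List.getD_eq_getElem?_getD, hij]

theorem pvBuckets_go (rung : List Int) (data : List (Int × Int)) :
    ∀ (bs : List (List (Int × Int))),
      (∀ x ∈ data, pvBisect rung x.2 0 rung.length < bs.length) →
      ((data.foldl (fun bs x => pvAppendAt bs (pvBisect rung x.2 0 rung.length) x) bs).length = bs.length) ∧
      ∀ j : Nat,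
        (data.foldl (fun bs x => pvAppendAt bs (pvBisect rung x.2 0 rung.length) x) bs).getD j []
          = bs.getD j [] ++ data.filter (fun x => decide (pvBisect rung x.2 0 rung.length = j)) := by
  induction data with
  | nil => intro bs _; exact ⟨rfl, fun j => by simp⟩
  | cons x ds ih =>
    intro bs hcov
    have hx : pvBisect rung x.2 0 rung.length < bs.length := hcov x List.mem_cons_self
    obtain ⟨hlen, hgetD⟩ := ih (pvAppendAt bs (pvBisect rung x.2 0 rung.length) x)
      (fun y hy => by rw [pvAppendAt_length]; exact hcov y (List.mem_cons_of_mem _ hy))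
    constructor
    · rw [List.foldl_cons, hlen, pvAppendAt_length]
    · intro j
      rw [List.foldl_cons, hgetD j, pvAppendAt_getD _ _ _ _ hx]
      by_cases hj : pvBisect rung x.2 0 rung.length = j
      · simp [hj]
      · simp [hj]

theorem pvBuckets_eq_partition (data : List (Int × Int)) (rung : List Int)
    (hchain : List.IsChain (· ≤ ·) rung)
    (hdat : ∀ x ∈ data, -1 < x.2 ∧ x.2 ≤ rung.getLastD (-1)) :
    pvBuckets data rung =
      (((-1 : Int) :: rung).zip ((-1 : Int) :: rung).tail).map
        (fun pr => data.filter (fun x => decide (pr.1 < x.2 ∧ x.2 ≤ pr.2))) := by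
  unfold pvBuckets
  have hcov : ∀ x ∈ data,
      pvBisect rung x.2 0 rung.length < (List.replicate rung.length ([] : List (Int × Int))).length := by
    intro x hx
    rw [List.length_replicate]
    obtain ⟨hr1, hr2⟩ := hdat x hx
    exact (pvBisect_char rung x.2 (pvChain_mono rung hchain) hr1 hr2).1
  obtain ⟨hL, hgetD⟩ := pvBuckets_go rung data _ hcov
  apply List.ext_getElem
  · rw [hL]; simp
  · intro j h1 h2
    have hjL : j < rung.length := by
      rw [hL, List.length_replicate] at h1
      exact h1
    rw [← List.getD_eq_getElem _ [] h1, hgetD j]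
    rw [List.getElem_map, List.getElem_zip]
    simp only [List.tail_cons]
    have hrepl : (List.replicate rung.length ([] : List (Int × Int))).getD j [] = [] := by
      simp [List.getD_eq_getElem?_getD, hjL]
    rw [hrepl, List.nil_append]
    apply List.filter_congr
    intro x hx
    obtain ⟨hr1, hr2⟩ := hdat x hx
    obtain ⟨_, hiff⟩ := pvBisect_char rung x.2 (pvChain_mono rung hchain) hr1 hr2
    rw [decide_eq_decide, hiff j hjL]
    rw [List.getD_eq_getElem ((-1 : Int) :: rung) 0
        (show j < ((-1 : Int) :: rung).length by simp only [List.length_cons]; omega),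
      List.getD_eq_getElem rung 0 hjL]

-- ===== VERDICT (by name: the statement is the Claim_ definition above) =====
theorem sparsify_data_py_spec : Claim_equal_sparsify_data_py := by
  intro data max_size rung_levels _hdom hpre
  unfold Spec_sparsify_data_py sparsify_data_py sparsify_data_py_alt
  by_cases hle : (data.length : Int) ≤ max_size
  · rw [if_pos hle, if_pos hle]
  · rw [if_neg hle, if_neg hle]
    rcases hpre with h | ⟨hchain, hdat⟩
    · exact absurd h hle
    · have hpart := pvBuckets_eq_partition data rung_levels hchain hdat
      show (pvOuterA max_size
            ((((-1 : Int) :: rung_levels).zip ((-1 : Int) :: rung_levels).tail).map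
              (fun pr => data.filter (fun x => decide (pr.1 < x.2 ∧ x.2 ≤ pr.2))))
            (data.length : Int)).1.flatten
          = (pvBOuter max_size (pvBuckets data rung_levels).length (pvBuckets data rung_levels)
              (data.length : Int)).1.flatten
      rw [hpart, pvOuter_eq max_size _ (data.length : Int) (not_le.mp hle)]
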